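-- pv_equiv track=rewrite | github.com/kylebarron/quantized-mesh-encoder | test/test_util_cy.py | decode_indices
-- ===== SOURCE A (Python) =====
-- def decode_indices(indices):
--     out = []
--     highest = 0
--     for i in indices:
--         out.append(highest - i)
--         if i == 0:
--             highest += 1
--     return out
-- ===== SOURCE B (Python) =====
-- def decode_indices(indices):
--     # Reverse traversal: highest-watermark before position j equals
--     # (total zeros) - (zeros in indices[j:]), so walk the list from the
--     # right keeping a suffix zero count and build the output back-to-front.
--     total = sum(1 for x in indices if x == 0)
--     out = []
--     seen = 0
--     for x in reversed(indices):
--         if x == 0: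
--             seen += 1
--         out.append(total - seen - x)
--     out.reverse()
--     return out
-- ===== Notes on version B (the rewrite author's own statement) =====
-- stated objective: alternative
-- what changed: Instead of a forward loop carrying a running watermark, B counts the zeros once, then traverses the list in reverse maintaining a suffix zero count and builds the output back-to-front (watermark before j = total zeros - zeros in suffix from j).
import Mathlib
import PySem

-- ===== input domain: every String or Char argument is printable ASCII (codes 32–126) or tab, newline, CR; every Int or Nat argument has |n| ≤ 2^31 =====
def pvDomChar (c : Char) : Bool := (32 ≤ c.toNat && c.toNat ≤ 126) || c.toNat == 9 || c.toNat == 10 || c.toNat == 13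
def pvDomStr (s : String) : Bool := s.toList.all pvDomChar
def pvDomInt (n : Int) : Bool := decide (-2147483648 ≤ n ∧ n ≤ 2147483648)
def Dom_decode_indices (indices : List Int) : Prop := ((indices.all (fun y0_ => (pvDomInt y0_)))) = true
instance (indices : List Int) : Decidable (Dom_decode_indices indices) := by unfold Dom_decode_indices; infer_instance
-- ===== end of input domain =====

-- B replaces A's forward loop with a running watermark by: one pass counting zeros, then a reverse traversal with a suffix zero count building the output back-to-front (alternative decomposition, same cost).


-- ===== PORT A =====
-- literal fold over (out, highest), appending highest - i, bumping highest on zero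
def decode_indices (indices : List Int) : List Int :=
  (indices.foldl
    (fun (s : List Int × Int) i =>
      (s.1 ++ [s.2 - i], if i = 0 then s.2 + 1 else s.2))
    ([], 0)).1

-- ===== PORT B =====
-- total = sum(1 for x if x == 0); then fold over reversed input with (out, seen); finally reverse out
def decode_indices_alt (indices : List Int) : List Int :=
  let total : Int := indices.foldl (fun n x => n + (if x = 0 then 1 else 0)) 0
  let p := indices.reverse.foldl
    (fun (s : List Int × Int) x =>
      let seen := if x = 0 then s.2 + 1 else s.2
      (s.1 ++ [total - seen - x], seen))
    (([] : List Int), (0 : Int))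
  p.1.reverse

-- ===== PRECONDITION & SPEC =====
def Spec_decode_indices (indices : List Int) (out : List Int) : Prop := out = decode_indices_alt indices
instance (indices : List Int) (out : List Int) : Decidable (Spec_decode_indices indices out) := by unfold Spec_decode_indices; infer_instance

-- ===== CLAIM (what is proved, stated in full; the proofs are below) =====
def Claim_equal_decode_indices : Prop := ∀ (indices : List Int), Dom_decode_indices indices → Spec_decode_indices indices (decode_indices indices)

-- ===== LEMMAS AND PROOFS =====

-- number of zeros in a list, as an Int
def pvZc : List Int → Int
  | [] => 0
  | x :: xs => (if x = 0 then 1 else 0) + pvZc xs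

-- reference result of A's loop starting from counter h
def pvSpecFrom (h : Int) : List Int → List Int
  | [] => []
  | x :: xs => (h - x) :: pvSpecFrom (h + (if x = 0 then 1 else 0)) xs

-- what B's inner fold appends, processing its argument left to right with seen-count s
def pvRev (t s : Int) : List Int → List Int
  | [] => []
  | x :: xs =>
    (t - (s + (if x = 0 then 1 else 0)) - x) :: pvRev t (s + (if x = 0 then 1 else 0)) xs

-- B's output read front to back: entry uses the zero-count of its own suffix
def pvFwd (t s : Int) : List Int → List Int
  | [] => []
  | x :: xs => (t - s - pvZc (x :: xs) - x) :: pvFwd t s xs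

theorem pvFoldA (xs : List Int) : ∀ (out : List Int) (h : Int),
    (xs.foldl (fun (s : List Int × Int) i =>
      (s.1 ++ [s.2 - i], if i = 0 then s.2 + 1 else s.2)) (out, h)).1
    = out ++ pvSpecFrom h xs := by
  induction xs with
  | nil => intro out h; simp [pvSpecFrom]
  | cons x xs ih =>
    intro out h
    simp only [List.foldl_cons, pvSpecFrom]
    rw [ih]
    by_cases hx : x = 0 <;> simp [hx]

theorem pvFoldTotal (xs : List Int) : ∀ (c : Int),
    xs.foldl (fun n x => n + (if x = 0 then 1 else 0)) c = c + pvZc xs := by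
  induction xs with
  | nil => intro c; simp [pvZc]
  | cons x xs ih => intro c; simp only [List.foldl_cons, pvZc, ih]; ring

theorem pvFoldB (t : Int) (xs : List Int) : ∀ (out : List Int) (s : Int),
    (xs.foldl (fun (st : List Int × Int) x =>
        (st.1 ++ [t - (if x = 0 then st.2 + 1 else st.2) - x],
         if x = 0 then st.2 + 1 else st.2)) (out, s))
    = (out ++ pvRev t s xs, s + pvZc xs) := by
  induction xs with
  | nil => intro out s; simp [pvRev, pvZc]
  | cons x xs ih =>
    intro out s
    simp only [List.foldl_cons, pvRev, pvZc]
    rw [ih]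
    by_cases hx : x = 0 <;> simp [hx, add_assoc]

theorem pvZcAppend (xs ys : List Int) : pvZc (xs ++ ys) = pvZc xs + pvZc ys := by
  induction xs with
  | nil => simp [pvZc]
  | cons x xs ih => simp [pvZc, ih]; ring

theorem pvZcReverse (xs : List Int) : pvZc xs.reverse = pvZc xs := by
  induction xs with
  | nil => rfl
  | cons x xs ih => simp [pvZc, List.reverse_cons, pvZcAppend, ih]; ring

theorem pvRevAppend (t : Int) (xs : List Int) : ∀ (s : Int) (ys : List Int),
    pvRev t s (xs ++ ys) = pvRev t s xs ++ pvRev t (s + pvZc xs) ys := by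
  induction xs with
  | nil => intro s ys; simp [pvRev, pvZc]
  | cons x xs ih =>
    intro s ys
    simp only [List.cons_append, pvRev, pvZc, ih]
    ring_nf

theorem pvRevToFwd (ys : List Int) : ∀ (t s : Int),
    (pvRev t s ys.reverse).reverse = pvFwd t s ys := by
  induction ys with
  | nil => intro t s; simp [pvRev, pvFwd]
  | cons y ys ih =>
    intro t s
    rw [List.reverse_cons, pvRevAppend, pvZcReverse]
    simp only [pvRev, List.reverse_append, List.reverse_cons, List.reverse_nil,
      List.nil_append, pvFwd, ih, List.singleton_append, List.cons.injEq]
    refine ⟨by simp [pvZc]; ring, trivial⟩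

theorem pvFwdSpec (xs : List Int) : ∀ (t h : Int),
    pvFwd t (t - h - pvZc xs) xs = pvSpecFrom h xs := by
  induction xs with
  | nil => intro t h; simp [pvFwd, pvSpecFrom]
  | cons x xs ih =>
    intro t h
    simp only [pvFwd, pvSpecFrom, List.cons.injEq]
    refine ⟨by simp [pvZc]; ring, ?_⟩
    have harg : t - h - pvZc (x :: xs)
        = t - (h + (if x = 0 then 1 else 0)) - pvZc xs := by
      simp [pvZc]; ring
    rw [harg, ih]

-- ===== VERDICT (by name: the statement is the Claim_ definition above) =====
theorem decode_indices_spec : Claim_equal_decode_indices := by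
  intro indices _
  unfold Spec_decode_indices decode_indices decode_indices_alt
  rw [pvFoldA indices [] 0]
  simp only [pvFoldTotal indices 0, Int.zero_add]
  rw [pvFoldB]
  simp only [List.nil_append]
  rw [pvRevToFwd]
  have := pvFwdSpec indices (pvZc indices) 0
  simp only [Int.sub_zero, Int.sub_self] at this
  exact this.symm
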